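-- pv_equiv track=rewrite | github.com/martinnilsson93/epunfold | distgame.py | _is_partition
-- ===== SOURCE A (Python) =====
-- def _is_partition(classes, elements):
--     """Return whether the nested container _classes_ partitions _elements_.
--
--     Note that elements may be omitted from the classes. So, eg., this returns True
--     for all input where _classes_ is an empty container.
--     """
--     classed_elements = set()
--     for class_ in classes:
--         for element in class_:
--             if element in classed_elements:
--                 return False
--             classed_elements.add(element)
--     elements = set(elements)
--     return all(classed_element in elements for classed_element in classed_elements)
-- ===== SOURCE B (Python) =====
-- def _is_partition(classes, elements):
--     # sort-and-merge: sort the flattened classes, detect duplicates by an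
--     # adjacent-pair scan, then verify containment in sorted(set(elements))
--     # with a two-pointer merge walk.
--     flat = sorted(x for c in classes for x in c)
--     for i in range(1, len(flat)):
--         if flat[i] == flat[i - 1]:
--             return False
--     pool = sorted(set(elements))
--     i = j = 0
--     while i < len(flat):
--         if j == len(pool):
--             return False
--         if pool[j] < flat[i]:
--             j += 1
--         elif pool[j] == flat[i]:
--             i += 1
--             j += 1
--         else:
--             return False
--     return True
-- ===== Notes on version B (the rewrite author's own statement) =====
-- stated objective: alternative
-- what changed: Replaces A's incremental hash-set membership loop by a sort-based algorithm: sort the flattened classes, detect duplicates by scanning adjacent pairs, and check containment against sorted(set(elements)) with a two-pointer merge walk.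
import Mathlib
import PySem

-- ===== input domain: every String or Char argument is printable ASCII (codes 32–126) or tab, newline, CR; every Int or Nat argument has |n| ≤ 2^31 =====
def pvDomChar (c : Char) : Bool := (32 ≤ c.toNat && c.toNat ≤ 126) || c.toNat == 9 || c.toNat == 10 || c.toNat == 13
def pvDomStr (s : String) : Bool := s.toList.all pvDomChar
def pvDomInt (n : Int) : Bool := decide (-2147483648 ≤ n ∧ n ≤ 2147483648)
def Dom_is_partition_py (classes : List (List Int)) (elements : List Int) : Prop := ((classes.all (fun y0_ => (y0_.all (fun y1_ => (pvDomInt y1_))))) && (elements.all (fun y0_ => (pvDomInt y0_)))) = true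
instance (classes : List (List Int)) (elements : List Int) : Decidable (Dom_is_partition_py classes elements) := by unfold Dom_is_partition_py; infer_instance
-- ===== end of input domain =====

-- B replaces A's incremental hash-set loop by a sort-based algorithm: sort the
-- flattened classes, find duplicates by an adjacent-pair scan, and check
-- containment in sorted(set(elements)) by a two-pointer merge walk (objective: alternative).

-- ===== PORT A =====
-- inner 'for element in class_' loop; none = the early 'return False'
def isPartClassLoop (cls : List Int) (acc : PySem.Set Int) : Option (PySem.Set Int) :=
  match cls with
  | [] => some acc
  | e :: rest =>
    if PySem.Set.contains acc e then none
    else isPartClassLoop rest (PySem.Set.add acc e)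

-- outer 'for class_ in classes' loop
def isPartLoop (classes : List (List Int)) (acc : PySem.Set Int) : Option (PySem.Set Int) :=
  match classes with
  | [] => some acc
  | c :: rest =>
    match isPartClassLoop c acc with
    | none => none
    | some acc' => isPartLoop rest acc'

def is_partition_py (classes : List (List Int)) (elements : List Int) : Bool :=
  match isPartLoop classes PySem.Set.empty with
  | none => false
  | some classed =>
    -- all(classed_element in elements for classed_element in classed_elements)
    classed.all (fun x => PySem.Set.contains (PySem.Set.ofList elements) x)

-- ===== PORT B =====
-- 'for i in range(1, len(flat)): if flat[i] == flat[i-1]: return False'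
-- (the early return is the negation of an 'all' over the range)
def adjOK (flat : List Int) : Bool :=
  (PySem.List.pyRange 1 flat.length 1).all
    (fun i => !(PySem.List.pyGetD flat i 0 == PySem.List.pyGetD flat (i - 1) 0))

-- the 'while i < len(flat)' two-pointer walk; Python's 'if j == len(pool)' is
-- written 'len(pool) ≤ j' (identical on every reachable state, where j ≤ len(pool);
-- the ≤ form makes termination evident for all arguments)
def mergeLoop (flat pool : List Int) (i j : Nat) : Bool :=
  if _h : i < flat.length then
    if pool.length ≤ j then false
    else if pool.getD j 0 < flat.getD i 0 then mergeLoop flat pool i (j + 1)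
    else if pool.getD j 0 = flat.getD i 0 then mergeLoop flat pool (i + 1) (j + 1)
    else false
  else true
termination_by (flat.length - i) + (pool.length - j)
decreasing_by all_goals omega

def is_partition_py_alt (classes : List (List Int)) (elements : List Int) : Bool :=
  let flat := PySem.List.sorted (classes.flatMap (fun c => c)) (fun x => x) false
  if adjOK flat then
    let pool := PySem.List.sorted (PySem.Set.ofList elements) (fun x => x) false
    mergeLoop flat pool 0 0
  else false

-- ===== PRECONDITION & SPEC =====
def Spec_is_partition_py (classes : List (List Int)) (elements : List Int) (out : Bool) : Prop := out = is_partition_py_alt classes elements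
instance (classes : List (List Int)) (elements : List Int) (out : Bool) : Decidable (Spec_is_partition_py classes elements out) := by unfold Spec_is_partition_py; infer_instance

-- ===== CLAIM (what is proved, stated in full; the proofs are below) =====
def Claim_equal_is_partition_py : Prop := ∀ (classes : List (List Int)) (elements : List Int), Dom_is_partition_py classes elements → Spec_is_partition_py classes elements (is_partition_py classes elements)

-- ===== LEMMAS AND PROOFS =====

-- ---- A-side characterisation (as in the Python: early-exit duplicate detection) ----
theorem isPartClassLoop_eq (cls : List Int) (acc : PySem.Set Int) (h : acc.Nodup) :
    isPartClassLoop cls acc = if (acc ++ cls).Nodup then some (acc ++ cls) else none := by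
  induction cls generalizing acc with
  | nil => simp [isPartClassLoop, h]
  | cons e rest ih =>
    rw [isPartClassLoop]
    by_cases he : e ∈ acc
    · have hn : ¬ (acc ++ e :: rest).Nodup := by
        intro hn
        exact (List.disjoint_of_nodup_append hn) he (List.mem_cons_self)
      simp [he, hn]
    · have hnd : (acc ++ [e]).Nodup := by
        rw [List.nodup_append]
        refine ⟨h, List.nodup_singleton e, ?_⟩
        intro a ha b hb
        rw [List.mem_singleton] at hb
        subst hb
        exact fun h' => he (h' ▸ ha)
      rw [if_neg (by simp [PySem.Set.contains, he] : ¬ PySem.Set.contains acc e = true)]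
      rw [PySem.Set.add_of_not_mem he, ih _ hnd]
      have harr : (acc ++ [e]) ++ rest = acc ++ e :: rest := by simp
      rw [harr]

theorem isPartLoop_eq (classes : List (List Int)) (acc : PySem.Set Int) (h : acc.Nodup) :
    isPartLoop classes acc =
      if (acc ++ classes.flatMap (fun c => c)).Nodup then some (acc ++ classes.flatMap (fun c => c)) else none := by
  induction classes generalizing acc with
  | nil => simp [isPartLoop, h]
  | cons c rest ih =>
    rw [isPartLoop, isPartClassLoop_eq c acc h]
    by_cases hc : (acc ++ c).Nodup
    · rw [if_pos hc]
      show isPartLoop rest (acc ++ c) = _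
      rw [ih _ hc]
      have harr : (acc ++ c) ++ rest.flatMap (fun c => c) = acc ++ (c :: rest).flatMap (fun c => c) := by
        simp
      rw [harr]
    · rw [if_neg hc]
      show (none : Option (PySem.Set Int)) = _
      have hsub : List.Sublist (acc ++ c) (acc ++ (c :: rest).flatMap (fun c => c)) := by
        simp only [List.flatMap_cons, ← List.append_assoc]
        exact List.sublist_append_left _ _
      rw [if_neg (fun hn => hc (hn.sublist hsub))]

-- A = (flat has no duplicate) && (every element of flat is in elements)
theorem is_partition_py_iff (classes : List (List Int)) (elements : List Int) :
    is_partition_py classes elements = true ↔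
      ((classes.flatMap (fun c => c)).Nodup ∧
        ∀ x ∈ classes.flatMap (fun c => c), x ∈ elements) := by
  unfold is_partition_py
  rw [isPartLoop_eq classes PySem.Set.empty List.nodup_nil]
  simp only [PySem.Set.empty, List.nil_append]
  by_cases h : (classes.flatMap (fun c => c)).Nodup
  · rw [if_pos h]
    simp only [h, true_and, List.all_eq_true]
    constructor
    · intro hall x hx
      have := hall x hx
      simpa [PySem.Set.contains, PySem.Set.mem_ofList] using this
    · intro hall x hx
      simpa [PySem.Set.contains, PySem.Set.mem_ofList] using hall x hx
  · rw [if_neg h]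
    simp only [Bool.false_eq_true, false_iff]
    intro hc
    exact h hc.1

-- ---- B-side: the adjacent-pair scan in terms of getElem ----
theorem adjOK_iff (flat : List Int) :
    adjOK flat = true ↔ ∀ (k : Nat), k + 1 < flat.length → flat.getD k 0 ≠ flat.getD (k + 1) 0 := by
  unfold adjOK
  rw [List.all_eq_true]
  constructor
  · intro h k hk
    have hmem : ((k : Int) + 1) ∈ PySem.List.pyRange 1 flat.length 1 := by
      rw [PySem.List.mem_pyRange_one]
      constructor <;> [omega; exact_mod_cast (by omega : (k : Int) + 1 < (flat.length : Int))]
    have hb := h _ hmem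
    simp only [Bool.not_eq_eq_eq_not, Bool.not_true, beq_eq_false_iff_ne, ne_eq] at hb
    have h1 : PySem.List.pyGetD flat ((k : Int) + 1) 0 = flat.getD (k + 1) 0 := by
      rw [show ((k : Int) + 1) = ((k + 1 : Nat) : Int) by omega]
      rw [PySem.List.pyGetD_natCast]
    have h2 : PySem.List.pyGetD flat ((k : Int) + 1 - 1) 0 = flat.getD k 0 := by
      rw [show ((k : Int) + 1 - 1) = ((k : Nat) : Int) by omega]
      rw [PySem.List.pyGetD_natCast]
    rw [h1, h2] at hb
    exact fun he => hb he.symm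
  · intro h i hi
    rw [PySem.List.mem_pyRange_one] at hi
    obtain ⟨h1, h2⟩ := hi
    obtain ⟨k, rfl⟩ : ∃ k : Nat, i = (k : Int) + 1 := ⟨(i - 1).toNat, by omega⟩
    have hk : k + 1 < flat.length := by exact_mod_cast (by omega : ((k : Int) + 1) < (flat.length : Int))
    have hne := h k hk
    simp only [Bool.not_eq_eq_eq_not, Bool.not_true, beq_eq_false_iff_ne, ne_eq]
    have hg1 : PySem.List.pyGetD flat ((k : Int) + 1) 0 = flat.getD (k + 1) 0 := by
      rw [show ((k : Int) + 1) = ((k + 1 : Nat) : Int) by omega]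
      rw [PySem.List.pyGetD_natCast]
    have hg2 : PySem.List.pyGetD flat ((k : Int) + 1 - 1) 0 = flat.getD k 0 := by
      rw [show ((k : Int) + 1 - 1) = ((k : Nat) : Int) by omega]
      rw [PySem.List.pyGetD_natCast]
    rw [hg1, hg2]
    exact fun he => hne he.symm

-- on a (≤)-sorted list the adjacent-pair scan decides Nodup
theorem adjOK_iff_nodup (flat : List Int) (hs : flat.Pairwise (· ≤ ·)) :
    adjOK flat = true ↔ flat.Nodup := by
  rw [adjOK_iff]
  constructor
  · intro h
    have hlt : flat.Pairwise (· < ·) := by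
      rw [← List.isChain_iff_pairwise]
      rw [List.isChain_iff_getElem]
      intro k hk
      have hle : flat[k] ≤ flat[k + 1] :=
        List.pairwise_iff_getElem.mp hs k (k + 1) (by omega) hk (by omega)
      have hne := h k hk
      rw [List.getD_eq_getElem _ _ (by omega : k < flat.length),
        List.getD_eq_getElem _ _ hk] at hne
      exact lt_of_le_of_ne hle hne
    exact hlt.imp (fun h => ne_of_lt h)
  · intro h k hk
    have := List.pairwise_iff_getElem.mp (List.nodup_iff_pairwise_ne.mp h)
      k (k + 1) (by omega) hk (by omega)
    rw [List.getD_eq_getElem _ _ (by omega : k < flat.length),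
      List.getD_eq_getElem _ _ hk]
    exact this

-- ---- B-side: the two-pointer walk as a structural merge ----
def merge : List Int → List Int → Bool
  | [], _ => true
  | _ :: _, [] => false
  | x :: xs, y :: ys =>
    if y < x then merge (x :: xs) ys
    else if y = x then merge xs ys
    else false

theorem mergeLoop_eq_merge (flat pool : List Int) (i j : Nat) :
    mergeLoop flat pool i j = merge (flat.drop i) (pool.drop j) := by
  induction i, j using mergeLoop.induct flat pool with
  | case1 i j hi hj =>
    rw [mergeLoop, dif_pos hi, if_pos hj]
    rw [List.drop_eq_getElem_cons hi, List.drop_eq_nil_of_le hj]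
    rfl
  | case2 i j hi hj hlt ih =>
    rw [mergeLoop, dif_pos hi, if_neg hj, if_pos hlt]
    have hj' : j < pool.length := by omega
    rw [ih, List.drop_eq_getElem_cons hi, List.drop_eq_getElem_cons hj']
    rw [merge]
    rw [if_pos (by simpa [List.getD_eq_getElem, hi, hj'] using hlt)]
  | case3 i j hi hj hlt heq ih =>
    rw [mergeLoop, dif_pos hi, if_neg hj, if_neg hlt, if_pos heq]
    have hj' : j < pool.length := by omega
    rw [ih, List.drop_eq_getElem_cons hi, List.drop_eq_getElem_cons hj']
    rw [merge]
    rw [if_neg (by simpa [List.getD_eq_getElem, hi, hj'] using hlt)]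
    rw [if_pos (by simpa [List.getD_eq_getElem, hi, hj'] using heq)]
  | case4 i j hi hj hlt heq =>
    rw [mergeLoop, dif_pos hi, if_neg hj, if_neg hlt, if_neg heq]
    have hj' : j < pool.length := by omega
    rw [List.drop_eq_getElem_cons hi, List.drop_eq_getElem_cons hj']
    rw [merge]
    rw [if_neg (by simpa [List.getD_eq_getElem, hi, hj'] using hlt)]
    rw [if_neg (by simpa [List.getD_eq_getElem, hi, hj'] using heq)]
  | case5 i j hi =>
    rw [mergeLoop, dif_neg hi]
    rw [List.drop_eq_nil_of_le (by omega : flat.length ≤ i)]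
    simp [merge]

-- on strictly sorted lists the merge walk decides containment
theorem merge_correct (ys xs : List Int) (hxs : xs.Pairwise (· < ·)) (hys : ys.Pairwise (· < ·)) :
    merge xs ys = true ↔ ∀ x ∈ xs, x ∈ ys := by
  induction ys generalizing xs with
  | nil =>
    cases xs with
    | nil => simp [merge]
    | cons x xs' =>
      rw [show merge (x :: xs') [] = false from rfl]
      simp only [Bool.false_eq_true, false_iff]
      intro h
      exact absurd (h x List.mem_cons_self) (List.not_mem_nil)
  | cons y ys' ih =>
    cases xs with
    | nil => simp [merge]
    | cons x xs' =>
      rw [merge]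
      have hys' : ys'.Pairwise (· < ·) := hys.of_cons
      by_cases hlt : y < x
      · rw [if_pos hlt, ih _ hxs hys']
        constructor
        · intro h z hz
          exact List.mem_cons_of_mem y (h z hz)
        · intro h z hz
          have hyz : y < z := by
            rcases List.mem_cons.mp hz with rfl | hz'
            · exact hlt
            · exact lt_trans hlt (List.rel_of_pairwise_cons hxs hz')
          rcases List.mem_cons.mp (h z hz) with rfl | hz'
          · exact absurd hyz (lt_irrefl z)
          · exact hz'
      · rw [if_neg hlt]
        by_cases heq : y = x
        · rw [if_pos heq, ih _ hxs.of_cons hys']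
          subst heq
          constructor
          · intro h z hz
            rcases List.mem_cons.mp hz with rfl | hz'
            · exact List.mem_cons_self
            · exact List.mem_cons_of_mem y (h z hz')
          · intro h z hz
            have hyz : y < z := List.rel_of_pairwise_cons hxs hz
            rcases List.mem_cons.mp (h z (List.mem_cons_of_mem y hz)) with rfl | hz'
            · exact absurd hyz (lt_irrefl z)
            · exact hz'
        · rw [if_neg heq]
          have hxy : x < y := by
            rcases lt_trichotomy x y with h | h | h
            · exact h
            · exact absurd h.symm heq
            · exact absurd h hlt
          constructor
          · intro h
            exact absurd h (by simp)
          · intro h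
            exfalso
            rcases List.mem_cons.mp (h x List.mem_cons_self) with rfl | hz'
            · exact lt_irrefl x hxy
            · exact lt_irrefl x (lt_trans hxy (List.rel_of_pairwise_cons hys hz'))

-- ===== VERDICT (by name: the statement is the Claim_ definition above) =====
theorem is_partition_py_spec : Claim_equal_is_partition_py := by
  intro classes elements _
  unfold Spec_is_partition_py
  rw [← Bool.coe_iff_coe]
  rw [is_partition_py_iff]
  have hB : is_partition_py_alt classes elements =
      (if adjOK (PySem.List.sorted (classes.flatMap (fun c => c)) (fun x => x) false) then
        mergeLoop (PySem.List.sorted (classes.flatMap (fun c => c)) (fun x => x) false)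
          (PySem.List.sorted (PySem.Set.ofList elements) (fun x => x) false) 0 0
      else false) := rfl
  rw [hB]
  have hperm : (PySem.List.sorted (classes.flatMap (fun c => c)) (fun x => x) false).Perm
      (classes.flatMap (fun c => c)) := PySem.List.sorted_perm _ _ _
  have hle : (PySem.List.sorted (classes.flatMap (fun c => c)) (fun x => x) false).Pairwise (· ≤ ·) := by
    simpa using PySem.List.sorted_pairwise (classes.flatMap (fun c => c)) (fun x => x)
  have hpool_lt : (PySem.List.sorted (PySem.Set.ofList elements) (fun x => x) false).Pairwise (· < ·) :=
    PySem.List.sorted_ofList_pairwise_lt elements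
  by_cases hN : (classes.flatMap (fun c => c)).Nodup
  · have hadj : adjOK (PySem.List.sorted (classes.flatMap (fun c => c)) (fun x => x) false) = true :=
      (adjOK_iff_nodup _ hle).mpr (hperm.nodup_iff.mpr hN)
    rw [if_pos hadj, mergeLoop_eq_merge, List.drop_zero, List.drop_zero]
    have hflat_lt : (PySem.List.sorted (classes.flatMap (fun c => c)) (fun x => x) false).Pairwise (· < ·) := by
      have hne := List.nodup_iff_pairwise_ne.mp (hperm.nodup_iff.mpr hN)
      exact (hle.and hne).imp (fun h => lt_of_le_of_ne h.1 h.2)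
    rw [merge_correct _ _ hflat_lt hpool_lt]
    constructor
    · intro ⟨_, h⟩ x hx
      rw [PySem.List.mem_sorted, PySem.Set.mem_ofList]
      exact h x (hperm.mem_iff.mp hx)
    · intro h
      refine ⟨hN, fun x hx => ?_⟩
      have := h x (hperm.mem_iff.mpr hx)
      rwa [PySem.List.mem_sorted, PySem.Set.mem_ofList] at this
  · have hadj : ¬ adjOK (PySem.List.sorted (classes.flatMap (fun c => c)) (fun x => x) false) = true :=
      fun h => hN (hperm.nodup_iff.mp ((adjOK_iff_nodup _ hle).mp h))
    rw [if_neg hadj]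
    simp only [Bool.false_eq_true, iff_false]
    exact fun hc => hN hc.1
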